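-- pv_equiv track=rewrite | github.com/theNikii/python | DZ/DZ3/DZ3_part2.py | trim_and_repeat
-- ===== SOURCE A (Python) =====
-- def trim_and_repeat(untrim_string,offset=0,repetitions=1):
--     trim_string = ''
--     for i in range(0,repetitions,+1):
--         count_loop = 0
--         for simvol in untrim_string:
--             if(count_loop >= offset):
--                 trim_string += simvol
--             count_loop+=1
--     return trim_string
-- ===== SOURCE B (Python) =====
-- def trim_and_repeat(untrim_string, offset=0, repetitions=1):
--     # Keeping exactly the characters with index >= offset is, for integer offsets,
--     # the slice from max(offset, 0); repeating is a single string multiply.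
--     return untrim_string[max(offset, 0):] * repetitions
-- ===== Notes on version B (the rewrite author's own statement) =====
-- stated objective: simpler
-- what changed: B replaces A's nested loops (re-scanning the whole source with per-character concatenation once per repetition) by a single clamped slice untrim_string[max(offset,0):] followed by one string multiply.
import Mathlib
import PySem

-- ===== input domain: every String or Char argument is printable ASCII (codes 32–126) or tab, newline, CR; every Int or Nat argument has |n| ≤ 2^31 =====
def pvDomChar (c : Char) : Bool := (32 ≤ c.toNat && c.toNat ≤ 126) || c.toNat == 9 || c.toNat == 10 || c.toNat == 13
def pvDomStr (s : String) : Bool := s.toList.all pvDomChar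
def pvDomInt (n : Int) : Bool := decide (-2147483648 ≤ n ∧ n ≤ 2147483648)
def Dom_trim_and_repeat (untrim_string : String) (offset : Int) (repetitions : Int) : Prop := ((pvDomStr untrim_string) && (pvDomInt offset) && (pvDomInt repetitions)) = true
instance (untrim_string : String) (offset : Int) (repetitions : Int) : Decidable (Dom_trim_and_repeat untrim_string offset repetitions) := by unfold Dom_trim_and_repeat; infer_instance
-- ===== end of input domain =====

-- B replaces A's nested loops by one clamped slice plus one string multiply (objective: simpler).

-- ===== PORT A =====
-- A: outer loop over range(0, repetitions, 1); inner loop over the characters with a running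
-- count, appending each character whose count is >= offset to the accumulated string.
def trim_and_repeat (untrim_string : String) (offset : Int) (repetitions : Int) : String :=
  String.ofList ((PySem.List.pyRange 0 repetitions 1).foldl (fun (trim : List Char) _ =>
    (untrim_string.toList.foldl
      (fun (st : List Char × Int) simvol =>
        (if st.2 ≥ offset then st.1 ++ [simvol] else st.1, st.2 + 1))
      (trim, 0)).1) [])

-- ===== PORT B =====
-- B: untrim_string[max(offset, 0):] * repetitions. The slice lower bound is clamped to 0,
-- so PySem.List.slice from max(offset,0) to the length is exact; str * n is empty for n ≤ 0.
def trim_and_repeat_alt (untrim_string : String) (offset : Int) (repetitions : Int) : String :=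
  String.ofList (List.replicate repetitions.toNat
    (PySem.List.slice untrim_string.toList (some (max offset 0)) none)).flatten

-- ===== PRECONDITION & SPEC =====
def Spec_trim_and_repeat (untrim_string : String) (offset : Int) (repetitions : Int) (out : String) : Prop := out = trim_and_repeat_alt untrim_string offset repetitions
instance (untrim_string : String) (offset : Int) (repetitions : Int) (out : String) : Decidable (Spec_trim_and_repeat untrim_string offset repetitions out) := by unfold Spec_trim_and_repeat; infer_instance

-- ===== CLAIM (what is proved, stated in full; the proofs are below) =====
def Claim_equal_trim_and_repeat : Prop := ∀ (untrim_string : String) (offset : Int) (repetitions : Int), Dom_trim_and_repeat untrim_string offset repetitions → Spec_trim_and_repeat untrim_string offset repetitions (trim_and_repeat untrim_string offset repetitions)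

-- ===== LEMMAS AND PROOFS =====

-- The inner scan's accumulator factors out.
theorem pv_inner_factor (offset : Int) (cs : List Char) (acc : List Char) (i : Int) :
    (cs.foldl (fun (st : List Char × Int) c =>
        (if st.2 ≥ offset then st.1 ++ [c] else st.1, st.2 + 1)) (acc, i)).1
    = acc ++ (cs.foldl (fun (st : List Char × Int) c =>
        (if st.2 ≥ offset then st.1 ++ [c] else st.1, st.2 + 1)) ([], i)).1 := by
  induction cs generalizing acc i with
  | nil => simp
  | cons c cs ih =>
    simp only [List.foldl_cons]
    by_cases h : i ≥ offset
    · simp only [if_pos h]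
      rw [ih (acc ++ [c]) (i + 1)]
      simp only [List.nil_append]
      rw [ih [c] (i + 1), List.append_assoc]
    · simp only [if_neg h]
      rw [ih acc (i + 1)]

-- A's inner scan starting at running count i keeps exactly the suffix from index (offset - i).
theorem pv_inner_drop (offset : Int) (cs : List Char) (i : Int) :
    (cs.foldl (fun (st : List Char × Int) c =>
        (if st.2 ≥ offset then st.1 ++ [c] else st.1, st.2 + 1)) ([], i)).1
    = cs.drop (offset - i).toNat := by
  induction cs generalizing i with
  | nil => simp
  | cons c cs ih =>
    simp only [List.foldl_cons]
    by_cases h : i ≥ offset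
    · simp only [if_pos h, List.nil_append]
      rw [pv_inner_factor offset cs [c] (i + 1), ih (i + 1)]
      have h1 : (offset - i).toNat = 0 := by omega
      have h2 : (offset - (i + 1)).toNat = 0 := by omega
      simp [h1, h2]
    · simp only [if_neg h]
      rw [ih (i + 1)]
      have : (offset - i).toNat = (offset - (i + 1)).toNat + 1 := by omega
      simp [this]

-- A's outer loop appends one copy of the trimmed piece per iteration.
theorem pv_outer_replicate (offset : Int) (cs : List Char) (l : List Int) (acc : List Char) :
    (l.foldl (fun (trim : List Char) _ =>
        (cs.foldl (fun (st : List Char × Int) c =>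
          (if st.2 ≥ offset then st.1 ++ [c] else st.1, st.2 + 1)) (trim, 0)).1) acc)
    = acc ++ (List.replicate l.length
        ((cs.foldl (fun (st : List Char × Int) c =>
          (if st.2 ≥ offset then st.1 ++ [c] else st.1, st.2 + 1)) ([], 0)).1)).flatten := by
  induction l generalizing acc with
  | nil => simp
  | cons x xs ih =>
    simp only [List.foldl_cons, List.length_cons, List.replicate_succ, List.flatten_cons]
    rw [pv_inner_factor offset cs acc 0, ih, List.append_assoc]

theorem pv_pyRange_len (n : Int) : (PySem.List.pyRange 0 n 1).length = n.toNat := by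
  simp [PySem.List.pyRange]
  intro h
  omega

-- The clamped open-ended slice is List.drop of the clamped offset.
theorem pv_slice_drop (cs : List Char) (offset : Int) :
    PySem.List.slice cs (some (max offset 0)) none = cs.drop (max offset 0).toNat := by
  have h : max offset 0 = (((max offset 0).toNat : Nat) : Int) := by omega
  rw [h, PySem.List.slice_from_natCast]
  simp

-- ===== VERDICT (by name: the statement is the Claim_ definition above) =====
theorem trim_and_repeat_spec : Claim_equal_trim_and_repeat := by
  intro s offset repetitions _
  unfold Spec_trim_and_repeat trim_and_repeat trim_and_repeat_alt
  rw [pv_outer_replicate, pv_pyRange_len, List.nil_append, pv_inner_drop, pv_slice_drop]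
  have : (offset - 0).toNat = (max offset 0).toNat := by omega
  rw [this]
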